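-- pv_equiv track=rewrite | github.com/hortonew/advent_of_code_2021 | day_3/main_3_1.py | convert_readings_to_frequency
-- ===== SOURCE A (Python) =====
-- from typing import List
--
-- def convert_readings_to_frequency(readings: List[str]):
--     d = {}
--     for reading in readings:
--         for idx, item in enumerate(reading):
--             if idx+1 not in d:
--                 d[idx+1] = {'0': 0, '1': 0}
--
--             if item == '0':
--                 d[idx+1]['0'] += 1
--             else:
--                 d[idx+1]['1'] += 1
--
--     return d
-- ===== SOURCE B (Python) =====
-- from typing import List
--
-- def convert_readings_to_frequency(readings: List[str]):
--     maxlen = max(map(len, readings), default=0)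
--
--     def zeros(idx):
--         return sum(1 for r in readings if idx < len(r) and r[idx] == '0')
--
--     def ones(idx):
--         return sum(1 for r in readings if idx < len(r) and r[idx] != '0')
--
--     return {idx + 1: {'0': zeros(idx), '1': ones(idx)} for idx in range(maxlen)}
-- ===== Notes on version B (the rewrite author's own statement) =====
-- stated objective: alternative
-- what changed: Column-major instead of row-major: each bit position gets its counts from one self-contained pass over all readings (skipping readings too short for the position), and the dict is emitted directly in key order, instead of growing a dict of counters incrementally while scanning each reading's characters.
import Mathlib
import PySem

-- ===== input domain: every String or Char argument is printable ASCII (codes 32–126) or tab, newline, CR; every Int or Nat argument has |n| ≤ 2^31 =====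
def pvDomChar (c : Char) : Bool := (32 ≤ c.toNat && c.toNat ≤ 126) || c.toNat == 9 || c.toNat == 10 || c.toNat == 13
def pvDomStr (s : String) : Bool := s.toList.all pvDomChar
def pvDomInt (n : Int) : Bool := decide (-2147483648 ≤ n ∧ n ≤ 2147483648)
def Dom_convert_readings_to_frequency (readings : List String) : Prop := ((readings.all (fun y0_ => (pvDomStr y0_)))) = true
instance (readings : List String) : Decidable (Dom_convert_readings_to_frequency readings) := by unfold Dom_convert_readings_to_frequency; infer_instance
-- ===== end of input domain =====

-- B counts column-major (one pass over the readings per bit position) instead of A's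
-- row-major incremental counters; same return value, stated objective: alternative.

-- ===== PORT A =====
def convert_readings_to_frequency (readings : List String) : List (Int × List (String × Int)) :=
  let d : PySem.Dict Int (PySem.Dict String Int) :=
    readings.foldl (fun d reading =>
      (PySem.List.enumerate reading.toList 0).foldl (fun d p =>
        let d := if d.contains (p.1 + 1) then d
                 else d.insert (p.1 + 1) (PySem.Dict.ofList [("0", (0 : Int)), ("1", (0 : Int))])
        if p.2 = '0' then d.modify (p.1 + 1) PySem.Dict.empty (fun inn => inn.modify "0" 0 (· + 1))
        else d.modify (p.1 + 1) PySem.Dict.empty (fun inn => inn.modify "1" 0 (· + 1))) d)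
      PySem.Dict.empty
  d.items.map (fun q => (q.1, q.2.items))

-- ===== PORT B =====
def pvZerosAt (readings : List String) (idx : Nat) : Int :=
  readings.foldl (fun acc r => if idx < r.toList.length ∧ r.toList.getD idx ' ' = '0' then acc + 1 else acc) 0

def pvOnesAt (readings : List String) (idx : Nat) : Int :=
  readings.foldl (fun acc r => if idx < r.toList.length ∧ r.toList.getD idx ' ' ≠ '0' then acc + 1 else acc) 0

def convert_readings_to_frequency_alt (readings : List String) : List (Int × List (String × Int)) :=
  let maxlen := readings.foldl (fun m r => max m r.toList.length) 0
  (List.range maxlen).map (fun (idx : Nat) =>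
    ((idx : Int) + 1, [("0", pvZerosAt readings idx), ("1", pvOnesAt readings idx)]))

-- ===== PRECONDITION & SPEC =====
def Spec_convert_readings_to_frequency (readings : List String) (out : List (Int × List (String × Int))) : Prop := out = convert_readings_to_frequency_alt readings
instance (readings : List String) (out : List (Int × List (String × Int))) : Decidable (Spec_convert_readings_to_frequency readings out) := by unfold Spec_convert_readings_to_frequency; infer_instance

-- ===== CLAIM (what is proved, stated in full; the proofs are below) =====
def Claim_equal_convert_readings_to_frequency : Prop := ∀ (readings : List String), Dom_convert_readings_to_frequency readings → Spec_convert_readings_to_frequency readings (convert_readings_to_frequency readings)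

-- ===== LEMMAS AND PROOFS =====

-- the abstract state: counts per position, and the dict A's loop maintains
def pvBump (c : Char) (p : Int × Int) : Int × Int := if c = '0' then (p.1 + 1, p.2) else (p.1, p.2 + 1)
def pvUpd (g : Nat → Int × Int) (s : Nat) (c : Char) : Nat → Int × Int := fun i => if i = s then pvBump c (g i) else g i
def pvInner (p : Int × Int) : PySem.Dict String Int := PySem.Dict.mk [("0", p.1), ("1", p.2)]
def pvMkD (g : Nat → Int × Int) (m : Nat) : PySem.Dict Int (PySem.Dict String Int) :=
  PySem.Dict.mk ((List.range m).map (fun (i : Nat) => ((i : Int) + 1, pvInner (g i))))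

def pvApplyChars (g : Nat → Int × Int) (s : Nat) : List Char → (Nat → Int × Int)
  | [] => g
  | c :: cs => pvApplyChars (pvUpd g s c) (s + 1) cs

def pvApplyAll (g : Nat → Int × Int) : List String → (Nat → Int × Int)
  | [] => g
  | r :: rs => pvApplyAll (pvApplyChars g 0 r.toList) rs

def pvZ : List String → Nat → Int
  | [], _ => 0
  | r :: rs, i => (if i < r.toList.length ∧ r.toList.getD i ' ' = '0' then 1 else 0) + pvZ rs i

def pvO : List String → Nat → Int
  | [], _ => 0
  | r :: rs, i => (if i < r.toList.length ∧ r.toList.getD i ' ' ≠ '0' then 1 else 0) + pvO rs i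

def pvMaxlen : List String → Nat
  | [] => 0
  | r :: rs => max r.toList.length (pvMaxlen rs)

-- A's single-character step, named for the lemmas
def pvStep (d : PySem.Dict Int (PySem.Dict String Int)) (p : Int × Char) : PySem.Dict Int (PySem.Dict String Int) :=
  let d := if d.contains (p.1 + 1) then d
           else d.insert (p.1 + 1) (PySem.Dict.ofList [("0", (0 : Int)), ("1", (0 : Int))])
  if p.2 = '0' then d.modify (p.1 + 1) PySem.Dict.empty (fun inn => inn.modify "0" 0 (· + 1))
  else d.modify (p.1 + 1) PySem.Dict.empty (fun inn => inn.modify "1" 0 (· + 1))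

theorem pv_get?_mkD (g : Nat → Int × Int) (m s : Nat) :
    (pvMkD g m).get? ((s : Int) + 1) = if s < m then some (pvInner (g s)) else none := by
  induction m with
  | zero => simp [pvMkD, PySem.Dict.get?]
  | succ m ih =>
    unfold pvMkD at *
    rw [List.range_succ, List.map_append]
    simp only [PySem.Dict.get?, List.find?_append] at *
    rcases h : List.find? (fun p => p.1 == (s : Int) + 1)
        ((List.range m).map fun (i : Nat) => ((i : Int) + 1, pvInner (g i))) with _ | v
    · simp only [h, Option.map_none] at ih
      have hs : ¬ s < m := by
        intro hl; rw [if_pos hl] at ih; simp at ih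
      simp only [h, Option.none_or, List.find?_cons, List.find?_nil, List.map]
      by_cases he : s = m
      · subst he
        simp
      · have : ((m : Int) + 1 == (s : Int) + 1) = false := by
          simp; omega
        rw [this]
        simp
        omega
    · simp only [h, Option.map_some] at ih
      have hs : s < m := by
        by_contra hl; rw [if_neg hl] at ih; simp at ih
      simp [h, hs, Nat.lt_succ_of_lt hs] at ih ⊢
      exact ih

theorem pv_contains_mkD (g : Nat → Int × Int) (m s : Nat) :
    (pvMkD g m).contains ((s : Int) + 1) = decide (s < m) := by
  rw [PySem.Dict.contains_eq_isSome_get?, pv_get?_mkD]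
  by_cases h : s < m <;> simp [h]

theorem pv_inner_mod0 (a b : Int) :
    (pvInner (a, b)).modify "0" 0 (· + 1) = pvInner (a + 1, b) := rfl

theorem pv_inner_mod1 (a b : Int) :
    (pvInner (a, b)).modify "1" 0 (· + 1) = pvInner (a, b + 1) := rfl

theorem pv_step_mkD (g : Nat → Int × Int) (m s : Nat) (c : Char) (hs : s ≤ m)
    (hg : ∀ i, m ≤ i → g i = (0, 0)) :
    pvStep (pvMkD g m) ((s : Int), c) = pvMkD (pvUpd g s c) (max m (s + 1)) := by
  unfold pvStep
  simp only [pv_contains_mkD]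
  by_cases hlt : s < m
  · -- key already present: no insert, just the modify
    have hmax : max m (s + 1) = m := by omega
    rw [hmax]
    simp only [hlt, decide_true, if_true]
    have hmod : ∀ f : PySem.Dict String Int → PySem.Dict String Int,
        (pvMkD g m).modify ((s : Int) + 1) PySem.Dict.empty f =
          PySem.Dict.mk ((List.range m).map fun (i : Nat) =>
            if i = s then (((s : Int)) + 1, f (pvInner (g s))) else ((i : Int) + 1, pvInner (g i))) := by
      intro f
      unfold PySem.Dict.modify
      rw [PySem.Dict.getD_eq_get?_getD, pv_get?_mkD, if_pos hlt]
      unfold PySem.Dict.insert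
      rw [pv_contains_mkD]
      simp only [hlt, decide_true, if_true]
      unfold pvMkD
      simp only [List.map_map]
      congr 1
      refine List.map_congr_left (fun i hi => ?_)
      by_cases he : i = s
      · subst he; simp
      · have : ((i : Int) + 1 == (s : Int) + 1) = false := by simp; omega
        simp [Function.comp, this, he]
    by_cases hc : c = '0'
    · rw [if_pos hc, hmod]
      subst hc
      refine congrArg _ (List.map_congr_left (fun i hi => ?_))
      by_cases he : i = s
      · subst he
        rcases h : g i with ⟨a, b⟩
        simp [pvUpd, pvBump, h, pv_inner_mod0]
      · simp [pvUpd, he]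
    · rw [if_neg hc, hmod]
      refine congrArg _ (List.map_congr_left (fun i hi => ?_))
      by_cases he : i = s
      · subst he
        rcases h : g i with ⟨a, b⟩
        simp [pvUpd, pvBump, h, hc, pv_inner_mod1]
      · simp [pvUpd, he]
  · -- fresh key: insert {'0':0,'1':0} at the end, then modify it
    have hse : s = m := by omega
    subst hse
    have hmax : max s (s + 1) = s + 1 := by omega
    rw [hmax]
    simp only [hlt, decide_false, Bool.false_eq_true, if_false]
    have hins : (pvMkD g s).insert ((s : Int) + 1) (PySem.Dict.ofList [("0", (0 : Int)), ("1", (0 : Int))]) =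
        pvMkD g (s + 1) := by
      unfold PySem.Dict.insert
      rw [pv_contains_mkD]
      simp only [Nat.lt_irrefl, decide_false, if_false]
      unfold pvMkD
      rw [List.range_succ, List.map_append]
      have : pvInner (g s) = PySem.Dict.ofList [("0", (0 : Int)), ("1", (0 : Int))] := by
        rw [hg s (Nat.le_refl s)]; rfl
      simp [this]
    rw [hins]
    have hmod : ∀ f : PySem.Dict String Int → PySem.Dict String Int,
        (pvMkD g (s + 1)).modify ((s : Int) + 1) PySem.Dict.empty f =
          PySem.Dict.mk ((List.range (s + 1)).map fun (i : Nat) =>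
            if i = s then (((s : Int)) + 1, f (pvInner (g s))) else ((i : Int) + 1, pvInner (g i))) := by
      intro f
      unfold PySem.Dict.modify
      rw [PySem.Dict.getD_eq_get?_getD, pv_get?_mkD, if_pos (Nat.lt_succ_self s)]
      unfold PySem.Dict.insert
      rw [pv_contains_mkD]
      simp only [Nat.lt_succ_self, decide_true, if_true]
      unfold pvMkD
      simp only [List.map_map]
      congr 1
      refine List.map_congr_left (fun i hi => ?_)
      by_cases he : i = s
      · subst he; simp
      · have : ((i : Int) + 1 == (s : Int) + 1) = false := by simp; omega
        simp [Function.comp, this, he]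
    by_cases hc : c = '0'
    · rw [if_pos hc, hmod]
      subst hc
      refine congrArg _ (List.map_congr_left (fun i hi => ?_))
      by_cases he : i = s
      · subst he
        rcases h : g i with ⟨a, b⟩
        simp [pvUpd, pvBump, h, pv_inner_mod0]
      · simp [pvUpd, he]
    · rw [if_neg hc, hmod]
      refine congrArg _ (List.map_congr_left (fun i hi => ?_))
      by_cases he : i = s
      · subst he
        rcases h : g i with ⟨a, b⟩
        simp [pvUpd, pvBump, h, hc, pv_inner_mod1]
      · simp [pvUpd, he]

theorem pv_upd_zero_beyond (g : Nat → Int × Int) (s : Nat) (c : Char) (m : Nat)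
    (hg : ∀ i, m ≤ i → g i = (0, 0)) : ∀ i, max m (s + 1) ≤ i → pvUpd g s c i = (0, 0) := by
  intro i hi
  unfold pvUpd
  have : i ≠ s := by omega
  simp [this]
  exact hg i (by omega)

theorem pv_inner_fold (cs : List Char) (s m : Nat) (g : Nat → Int × Int) (hs : s ≤ m)
    (hg : ∀ i, m ≤ i → g i = (0, 0)) :
    (PySem.List.enumerate cs (s : Int)).foldl pvStep (pvMkD g m) =
      pvMkD (pvApplyChars g s cs) (max m (s + cs.length)) := by
  induction cs generalizing s m g with
  | nil => simp [PySem.List.enumerate_nil, pvApplyChars]; congr 1; omega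
  | cons c cs ih =>
    rw [PySem.List.enumerate_cons]
    simp only [List.foldl_cons]
    rw [pv_step_mkD g m s c hs hg]
    have hcast : (s : Int) + 1 = ((s + 1 : Nat) : Int) := by push_cast; ring
    rw [hcast, ih (s + 1) (max m (s + 1)) (pvUpd g s c) (by omega) (pv_upd_zero_beyond g s c m hg)]
    show _ = pvMkD (pvApplyChars (pvUpd g s c) (s + 1) cs) _
    congr 1
    simp only [List.length_cons]
    omega

theorem pv_applyChars_apply (cs : List Char) (s : Nat) (g : Nat → Int × Int) (i : Nat) :
    pvApplyChars g s cs i =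
      if s ≤ i ∧ i < s + cs.length then pvBump (cs.getD (i - s) ' ') (g i) else g i := by
  induction cs generalizing s g with
  | nil => simp [pvApplyChars]
  | cons c cs ih =>
    unfold pvApplyChars
    rw [ih]
    by_cases he : i = s
    · subst he
      have h1 : ¬ (i + 1 ≤ i ∧ i < i + 1 + cs.length) := by omega
      have h2 : i ≤ i ∧ i < i + (cs.length + 1) := by omega
      simp only [List.length_cons, h1, if_false, h2, if_true]
      simp [pvUpd, List.getD]
    · by_cases h1 : s + 1 ≤ i ∧ i < s + 1 + cs.length
      · have h2 : s ≤ i ∧ i < s + (cs.length + 1) := by omega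
        simp only [List.length_cons, h1, if_true, h2, if_true]
        have h3 : i - s = (i - s - 1) + 1 := by omega
        have h4 : i - (s + 1) = i - s - 1 := by omega
        rw [h3]
        simp [pvUpd, he, List.getD, h4]
      · have h2 : ¬ (s ≤ i ∧ i < s + (cs.length + 1)) := by omega
        simp only [List.length_cons, h1, if_false, h2, if_false]
        simp [pvUpd, he]

theorem pv_outer_fold (rs : List String) (g : Nat → Int × Int) (m : Nat)
    (hg : ∀ i, m ≤ i → g i = (0, 0)) :
    rs.foldl (fun d r => (PySem.List.enumerate r.toList 0).foldl pvStep d) (pvMkD g m) =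
      pvMkD (pvApplyAll g rs) (max m (pvMaxlen rs)) := by
  induction rs generalizing g m with
  | nil => simp [pvApplyAll, pvMaxlen]
  | cons r rs ih =>
    simp only [List.foldl_cons]
    have hin := pv_inner_fold r.toList 0 m g (Nat.zero_le m) hg
    rw [Nat.cast_zero] at hin
    rw [hin]
    simp only [Nat.zero_add]
    have hg' : ∀ i, max m r.toList.length ≤ i → pvApplyChars g 0 r.toList i = (0, 0) := by
      intro i hi
      rw [pv_applyChars_apply]
      rw [if_neg (by omega)]
      exact hg i (by omega)
    rw [ih (pvApplyChars g 0 r.toList) (max m r.toList.length) hg']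
    have hm : max (max m r.toList.length) (pvMaxlen rs) = max m (pvMaxlen (r :: rs)) := by
      show _ = max m (max r.toList.length (pvMaxlen rs))
      omega
    rw [hm]
    rfl

theorem pv_applyAll_apply (rs : List String) (g : Nat → Int × Int) (i : Nat) :
    pvApplyAll g rs i = ((g i).1 + pvZ rs i, (g i).2 + pvO rs i) := by
  induction rs generalizing g with
  | nil =>
    show g i = _
    unfold pvZ pvO
    simp
  | cons r rs ih =>
    unfold pvApplyAll pvZ pvO
    rw [ih, pv_applyChars_apply]
    simp only [Nat.zero_add, Nat.zero_le, true_and, Nat.sub_zero]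
    unfold pvBump
    split_ifs with h1 h2 h3 h4 h5 <;>
      refine Prod.ext ?_ ?_ <;> simp <;> first | ring | omega | tauto

theorem pv_zeros_fold (rs : List String) (i : Nat) (a : Int) :
    rs.foldl (fun acc r => if i < r.toList.length ∧ r.toList.getD i ' ' = '0' then acc + 1 else acc) a =
      a + pvZ rs i := by
  induction rs generalizing a with
  | nil => simp [pvZ]
  | cons r rs ih =>
    simp only [List.foldl_cons, pvZ]
    rw [ih]
    split_ifs <;> ring

theorem pv_ones_fold (rs : List String) (i : Nat) (a : Int) :
    rs.foldl (fun acc r => if i < r.toList.length ∧ r.toList.getD i ' ' ≠ '0' then acc + 1 else acc) a =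
      a + pvO rs i := by
  induction rs generalizing a with
  | nil => simp [pvO]
  | cons r rs ih =>
    simp only [List.foldl_cons, pvO]
    rw [ih]
    split_ifs <;> ring

theorem pv_maxlen_fold (rs : List String) (a : Nat) :
    rs.foldl (fun m r => max m r.toList.length) a = max a (pvMaxlen rs) := by
  induction rs generalizing a with
  | nil => simp [pvMaxlen]
  | cons r rs ih =>
    simp only [List.foldl_cons, pvMaxlen]
    rw [ih]
    omega

-- ===== VERDICT (by name: the statement is the Claim_ definition above) =====
theorem convert_readings_to_frequency_spec : Claim_equal_convert_readings_to_frequency := by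
  intro readings _
  unfold Spec_convert_readings_to_frequency
  have hA : convert_readings_to_frequency readings =
      (readings.foldl (fun d r => (PySem.List.enumerate r.toList 0).foldl pvStep d)
        (pvMkD (fun _ => (0, 0)) 0)).items.map (fun q => (q.1, q.2.items)) := rfl
  have hB : convert_readings_to_frequency_alt readings =
      (List.range (readings.foldl (fun m r => max m r.toList.length) 0)).map (fun (idx : Nat) =>
        ((idx : Int) + 1, [("0", pvZerosAt readings idx), ("1", pvOnesAt readings idx)])) := rfl
  rw [hA, hB, pv_outer_fold readings (fun _ => (0, 0)) 0 (fun _ _ => rfl), pv_maxlen_fold]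
  simp only [Nat.zero_max]
  unfold pvMkD
  rw [List.map_map]
  refine List.map_congr_left (fun i _ => ?_)
  simp only [Function.comp]
  rw [pv_applyAll_apply]
  show ((i : Int) + 1, [("0", _), ("1", _)]) = _
  rw [pvZerosAt, pvOnesAt, pv_zeros_fold, pv_ones_fold]
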